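-- pv_equiv track=rewrite | github.com/hybridops-tech/hybridops-core | hyops/runtime/vault.py | _password_command_hint
-- ===== SOURCE A (Python) =====
-- def _password_command_hint(detail: str) -> str:
--     msg = (detail or "").strip().lower()
--     hints: list[str] = []
--     if "entry not ready" in msg or "run --bootstrap" in msg:
--         hints.append("run: hyops vault bootstrap")
--     if (
--         "cannot decrypt" in msg
--         or "no pinentry" in msg
--         or "public key decryption failed" in msg
--         or "decryption failed" in msg
--         or "pinentry" in msg
--     ):
--         hints.append("unlock GPG in this shell: hyops vault password >/dev/null")
--     if (
--         "tty required" in msg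
--         or "no controlling terminal" in msg
--         or "not a tty" in msg
--         or "no such device or address" in msg
--     ):
--         hints.append(
--             "run from an interactive terminal (TTY), or set HYOPS_VAULT_PASSWORD_FILE for non-interactive runs"
--         )
--     if not hints:
--         hints.append("verify vault password command, then run: hyops vault status-verbose")
--     # Keep ordering stable while removing duplicates.
--     uniq: list[str] = []
--     seen: set[str] = set()
--     for item in hints:
--         if item in seen:
--             continue
--         seen.add(item)
--         uniq.append(item)
--     return "; ".join(uniq)
-- ===== SOURCE B (Python) =====
-- _GROUPS = [
--     ("entry not ready", "run --bootstrap"),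
--     ("cannot decrypt", "no pinentry", "public key decryption failed",
--      "decryption failed", "pinentry"),
--     ("tty required", "no controlling terminal", "not a tty",
--      "no such device or address"),
-- ]
--
-- _HINTS = [
--     "run: hyops vault bootstrap",
--     "unlock GPG in this shell: hyops vault password >/dev/null",
--     "run from an interactive terminal (TTY), or set HYOPS_VAULT_PASSWORD_FILE for non-interactive runs",
-- ]
--
-- _FALLBACK = "verify vault password command, then run: hyops vault status-verbose"
--
-- # All 8 possible answers, precomputed once at import time, indexed by the bit
-- # mask of matched groups (bit i set <=> group i matched).
-- _TABLE = [
--     "; ".join(h for i, h in enumerate(_HINTS) if mask // 2**i % 2) or _FALLBACK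
--     for mask in range(8)
-- ]
--
--
-- def _password_command_hint(detail: str) -> str:
--     msg = (detail or "").strip().lower()
--     mask = 0
--     for keys in reversed(_GROUPS):
--         mask = mask * 2 + any(k in msg for k in keys)
--     return _TABLE[mask]
-- ===== Notes on version B (the rewrite author's own statement) =====
-- stated objective: alternative
-- what changed: Instead of appending hints to a list, deduping with a seen-set and joining per call, B folds the three group matches into a 3-bit mask and returns the answer from an 8-entry table of all possible joined hint strings precomputed at import time.
import Mathlib
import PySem

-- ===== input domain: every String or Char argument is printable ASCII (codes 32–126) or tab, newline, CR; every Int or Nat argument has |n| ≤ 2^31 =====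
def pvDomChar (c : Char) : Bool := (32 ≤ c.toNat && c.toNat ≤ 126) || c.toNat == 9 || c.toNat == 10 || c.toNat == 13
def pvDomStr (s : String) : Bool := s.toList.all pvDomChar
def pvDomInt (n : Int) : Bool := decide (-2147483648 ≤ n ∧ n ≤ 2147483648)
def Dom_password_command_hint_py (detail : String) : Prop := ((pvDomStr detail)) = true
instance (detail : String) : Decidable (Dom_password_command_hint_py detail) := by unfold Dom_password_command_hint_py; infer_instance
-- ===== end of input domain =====

-- B replaces A's list-append / seen-set-dedup / join pipeline by a 3-bit mask of matched
-- keyword groups indexing a precomputed 8-entry table of all possible answers: alternative.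


-- ===== PORT A =====
def password_command_hint_py (detail : String) : String :=
  let msg := PySem.Str.lower (PySem.Str.strip (if detail == "" then "" else detail))
  let hints : List String := []
  let hints := if PySem.Str.isIn "entry not ready" msg || PySem.Str.isIn "run --bootstrap" msg
    then hints ++ ["run: hyops vault bootstrap"] else hints
  let hints := if PySem.Str.isIn "cannot decrypt" msg || (PySem.Str.isIn "no pinentry" msg
      || (PySem.Str.isIn "public key decryption failed" msg || (PySem.Str.isIn "decryption failed" msg
      || PySem.Str.isIn "pinentry" msg)))
    then hints ++ ["unlock GPG in this shell: hyops vault password >/dev/null"] else hints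
  let hints := if PySem.Str.isIn "tty required" msg || (PySem.Str.isIn "no controlling terminal" msg
      || (PySem.Str.isIn "not a tty" msg || PySem.Str.isIn "no such device or address" msg))
    then hints ++ ["run from an interactive terminal (TTY), or set HYOPS_VAULT_PASSWORD_FILE for non-interactive runs"] else hints
  let hints := if hints.isEmpty
    then hints ++ ["verify vault password command, then run: hyops vault status-verbose"] else hints
  let uniqSeen := hints.foldl
    (fun (p : List String × PySem.Set String) item =>
      if p.2.contains item then p else (p.1 ++ [item], p.2.add item))
    ([], PySem.Set.empty)
  PySem.Str.join "; " uniqSeen.1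

-- ===== PORT B =====
def pvGroups : List (List String) :=
  [ ["entry not ready", "run --bootstrap"],
    ["cannot decrypt", "no pinentry", "public key decryption failed",
     "decryption failed", "pinentry"],
    ["tty required", "no controlling terminal", "not a tty",
     "no such device or address"] ]

def pvHints : List String :=
  [ "run: hyops vault bootstrap",
    "unlock GPG in this shell: hyops vault password >/dev/null",
    "run from an interactive terminal (TTY), or set HYOPS_VAULT_PASSWORD_FILE for non-interactive runs" ]

def pvFallback : String := "verify vault password command, then run: hyops vault status-verbose"

-- Source B's _TABLE comprehension: "; ".join(h for i,h in enumerate(_HINTS) if mask // 2**i % 2) or _FALLBACK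
def pvTable : List String :=
  (PySem.List.pyRange 0 8 1).map (fun mask =>
    let s := PySem.Str.join "; " (((PySem.List.enumerate pvHints).filter
      (fun p => PySem.Int.mod (PySem.Int.floordiv mask (2 ^ p.1.toNat)) 2 != 0)).map (·.2))
    if s == "" then pvFallback else s)

def password_command_hint_py_alt (detail : String) : String :=
  let msg := PySem.Str.lower (PySem.Str.strip (if detail == "" then "" else detail))
  let mask : Int := pvGroups.reverse.foldl
    (fun mask keys => mask * 2 + (if keys.any (fun k => PySem.Str.isIn k msg) then 1 else 0)) 0
  (PySem.List.pyGet? pvTable mask).getD ""  -- mask ∈ [0,8): index always in range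

-- ===== PRECONDITION & SPEC =====
def Spec_password_command_hint_py (detail : String) (out : String) : Prop := out = password_command_hint_py_alt detail
instance (detail : String) (out : String) : Decidable (Spec_password_command_hint_py detail out) := by unfold Spec_password_command_hint_py; infer_instance

-- ===== CLAIM (what is proved, stated in full; the proofs are below) =====
def Claim_equal_password_command_hint_py : Prop := ∀ (detail : String), Dom_password_command_hint_py detail → Spec_password_command_hint_py detail (password_command_hint_py detail)

-- ===== LEMMAS AND PROOFS =====

-- ===== VERDICT (by name: the statement is the Claim_ definition above) =====
set_option maxHeartbeats 1000000 in
set_option maxRecDepth 4000 in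
theorem password_command_hint_py_spec : Claim_equal_password_command_hint_py := by
  intro detail _
  unfold Spec_password_command_hint_py password_command_hint_py password_command_hint_py_alt pvGroups
  simp only [List.reverse_cons, List.reverse_nil, List.nil_append, List.cons_append,
    List.foldl_cons, List.foldl_nil, List.any_cons, List.any_nil, Bool.or_false]
  generalize (PySem.Str.lower (PySem.Str.strip (if detail == "" then "" else detail))) = msg
  cases h1 : (PySem.Str.isIn "entry not ready" msg || PySem.Str.isIn "run --bootstrap" msg) <;>
  cases h2 : (PySem.Str.isIn "cannot decrypt" msg || (PySem.Str.isIn "no pinentry" msg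
      || (PySem.Str.isIn "public key decryption failed" msg || (PySem.Str.isIn "decryption failed" msg
      || PySem.Str.isIn "pinentry" msg)))) <;>
  cases h3 : (PySem.Str.isIn "tty required" msg || (PySem.Str.isIn "no controlling terminal" msg
      || (PySem.Str.isIn "not a tty" msg || PySem.Str.isIn "no such device or address" msg))) <;>
  decide
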